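-- pv_equiv track=rewrite | github.com/jt17819/Advent-Of-Code-2023 | Day 12/solution 1.py | check_spring
-- ===== SOURCE A (Python) =====
-- def check_spring(map_to_check, expected):
--     count = 0
--     consec_springs = []
--     for s in map_to_check:
--         if s == "#":
--             count += 1
--         elif count:
--             consec_springs.append(count)
--             count = 0
--     if count:
--         consec_springs.append(count)
--     return consec_springs == expected
-- ===== SOURCE B (Python) =====
-- def check_spring(map_to_check, expected):
--     masked = "".join(c if c == "#" else " " for c in map_to_check)
--     return [len(part) for part in masked.split()] == expected
-- ===== Notes on version B (the rewrite author's own statement) =====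
-- stated objective: idiomatic
-- what changed: B replaces A's per-character counter with a post-loop flush by staged passes: mask every non-'#' character to a space, let str.split() produce the maximal '#' runs, and compare their lengths to expected.
import Mathlib
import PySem

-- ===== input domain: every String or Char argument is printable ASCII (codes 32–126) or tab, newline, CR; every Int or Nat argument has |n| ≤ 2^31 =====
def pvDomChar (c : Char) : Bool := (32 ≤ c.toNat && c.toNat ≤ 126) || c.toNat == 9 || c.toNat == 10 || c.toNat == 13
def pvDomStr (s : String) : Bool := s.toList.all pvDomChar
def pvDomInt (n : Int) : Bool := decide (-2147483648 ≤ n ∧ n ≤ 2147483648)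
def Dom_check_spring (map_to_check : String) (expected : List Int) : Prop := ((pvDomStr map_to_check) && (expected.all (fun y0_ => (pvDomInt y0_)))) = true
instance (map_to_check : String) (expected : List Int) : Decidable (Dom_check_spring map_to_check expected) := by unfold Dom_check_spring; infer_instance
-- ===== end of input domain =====

-- B replaces A's per-character counter + post-loop flush by staged passes: mask every non-'#' to a space, split the masked string on whitespace, compare the pieces' lengths (objective: idiomatic, same cost).

-- ===== PORT A =====
-- A's for-loop: state (count, consec_springs); '#' increments count, otherwise a
-- nonzero count is flushed; after the loop a pending count is flushed once more.
def checkSpringGoA : List Char → Int → List Int → Int × List Int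
  | [], count, acc => (count, acc)
  | c :: rest, count, acc =>
    if c = '#' then checkSpringGoA rest (count + 1) acc
    else if count ≠ 0 then checkSpringGoA rest 0 (acc ++ [count])
    else checkSpringGoA rest count acc

def check_spring (map_to_check : String) (expected : List Int) : Bool :=
  let r := checkSpringGoA map_to_check.toList 0 []
  let consec_springs := if r.1 ≠ 0 then r.2 ++ [r.1] else r.2
  decide (consec_springs = expected)

-- ===== PORT B =====
-- B: masked = ''.join(c if c == '#' else ' ' for c in map_to_check);
--    [len(part) for part in masked.split()] == expected
def check_spring_alt (map_to_check : String) (expected : List Int) : Bool :=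
  let masked := map_to_check.toList.map (fun c => if c = '#' then c else ' ')
  decide ((PySem.Chars.split₀ masked).map (fun p => (p.length : Int)) = expected)

-- ===== PRECONDITION & SPEC =====
def Spec_check_spring (map_to_check : String) (expected : List Int) (out : Bool) : Prop := out = check_spring_alt map_to_check expected
instance (map_to_check : String) (expected : List Int) (out : Bool) : Decidable (Spec_check_spring map_to_check expected out) := by unfold Spec_check_spring; infer_instance

-- ===== CLAIM (what is proved, stated in full; the proofs are below) =====
def Claim_equal_check_spring : Prop := ∀ (map_to_check : String) (expected : List Int), Dom_check_spring map_to_check expected → Spec_check_spring map_to_check expected (check_spring map_to_check expected)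

-- ===== LEMMAS AND PROOFS =====

-- proof-side characterisation of A's result: pending count, remaining input
def runsR : List Char → Int → List Int
  | [], count => if count ≠ 0 then [count] else []
  | c :: rest, count =>
    if c = '#' then runsR rest (count + 1)
    else if count ≠ 0 then count :: runsR rest 0
    else runsR rest count

def finalizeA (r : Int × List Int) : List Int :=
  if r.1 ≠ 0 then r.2 ++ [r.1] else r.2

theorem goA_runsR (l : List Char) (count : Int) (acc : List Int) :
    finalizeA (checkSpringGoA l count acc) = acc ++ runsR l count := by
  induction l generalizing count acc with
  | nil => simp only [checkSpringGoA, runsR, finalizeA]; split <;> simp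
  | cons c rest ih =>
    by_cases hc : c = '#'
    · simp [checkSpringGoA, runsR, hc, ih]
    · by_cases h0 : count ≠ 0
      · simp [checkSpringGoA, runsR, hc, h0, ih]
      · simp [checkSpringGoA, runsR, hc, h0, ih]

-- B's split₀.go on a masked list computes A's runs (lengths), with the pending
-- word cur carrying the current count and acc the flushed runs (reversed).
theorem splitGo_runsR (l : List Char) (cur : List Char) (acc : List (List Char)) :
    (PySem.Chars.split₀.go (l.map (fun c => if c = '#' then c else ' ')) cur acc).map
        (fun p => (p.length : Int)) =
      acc.reverse.map (fun p => (p.length : Int)) ++ runsR l (cur.length : Int) := by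
  induction l generalizing cur acc with
  | nil =>
    simp only [List.map_nil, PySem.Chars.split₀.go, runsR]
    by_cases h : cur.isEmpty
    · have : cur = [] := List.isEmpty_iff.mp h
      simp [h, this]
    · have : cur ≠ [] := fun hh => h (by simp [hh])
      simp only [h, if_neg]
      have hlen : (cur.length : Int) ≠ 0 := by
        simp [Int.natCast_eq_zero, List.length_eq_zero_iff, this]
      simp [hlen, this]
  | cons c rest ih =>
    by_cases hc : c = '#'
    · subst hc
      have hsp : ¬ PySem.Chars.isspace '#' = true := by decide
      have hmask : (if ('#' : Char) = '#' then ('#' : Char) else ' ') = '#' := by decide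
      rw [List.map_cons, hmask]
      simp only [PySem.Chars.split₀.go, if_neg hsp]
      have hr : runsR ('#' :: rest) (cur.length : Int) = runsR rest ((cur.length : Int) + 1) := by
        rw [runsR]; simp
      rw [ih ('#' :: cur) acc, hr]
      simp only [List.length_cons]
      norm_num
    · have hsp : PySem.Chars.isspace ' ' = true := by decide
      simp only [List.map_cons, if_neg hc, PySem.Chars.split₀.go, if_pos hsp, runsR,
        if_neg hc]
      by_cases h : cur.isEmpty
      · have hnil : cur = [] := List.isEmpty_iff.mp h
        subst hnil
        simp [ih [] acc]
      · have hne : cur ≠ [] := fun hh => h (by simp [hh])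
        have hlen : (cur.length : Int) ≠ 0 := by
          simp [Int.natCast_eq_zero, List.length_eq_zero_iff, hne]
        simp only [h, Bool.false_eq_true, if_false, if_pos hlen]
        rw [ih [] (cur.reverse :: acc)]
        simp

-- ===== VERDICT (by name: the statement is the Claim_ definition above) =====
theorem check_spring_spec : Claim_equal_check_spring := by
  intro s e _
  unfold Spec_check_spring check_spring check_spring_alt
  have hA := goA_runsR s.toList 0 []
  unfold finalizeA at hA
  have hB := splitGo_runsR s.toList [] []
  simp only [List.nil_append] at hA
  simp only [List.reverse_nil, List.map_nil, List.length_nil, Int.natCast_zero,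
    List.nil_append] at hB
  simp [PySem.Chars.split₀, hA, hB]
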